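-- pv_equiv track=rewrite | github.com/cihangemi/WordFrequency | clrnums.py | clearNums
-- ===== SOURCE A (Python) =====
-- def clearNums(allwords):
--     withoutnums=[]
--     nums="0123456789"
--     for word in allwords:
--         for num in nums:
--             if num in word:
--                 word=word.replace(num,"")
--
--         if (len(word)>0):
--             withoutnums.append(word)
--     return withoutnums
-- ===== SOURCE B (Python) =====
-- def clearNums(allwords):
--     cleaned = ["".join(c for c in word if c not in "0123456789") for word in allwords]
--     return [w for w in cleaned if w]
-- ===== Notes on version B (the rewrite author's own statement) =====
-- stated objective: simpler
-- what changed: B filters out digit characters from each word in a single character pass (comprehension + join) and then drops empty strings, instead of A's per-digit membership-test-and-replace loop over the ten digit constants.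
import Mathlib
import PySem

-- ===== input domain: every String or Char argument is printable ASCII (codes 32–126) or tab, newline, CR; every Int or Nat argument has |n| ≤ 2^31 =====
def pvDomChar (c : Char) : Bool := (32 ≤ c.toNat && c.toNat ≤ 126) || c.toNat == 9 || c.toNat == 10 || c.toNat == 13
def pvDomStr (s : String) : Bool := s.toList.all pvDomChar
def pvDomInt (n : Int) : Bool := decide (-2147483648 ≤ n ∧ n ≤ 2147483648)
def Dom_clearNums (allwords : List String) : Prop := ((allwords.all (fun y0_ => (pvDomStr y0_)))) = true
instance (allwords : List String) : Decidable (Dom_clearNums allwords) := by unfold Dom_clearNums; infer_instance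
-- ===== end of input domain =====

-- B replaces A's per-digit membership-test-and-replace loop by one character-filtering
-- pass per word (objective: simpler); same return value on every input.

-- ===== PORT A =====
-- one iteration of A's outer `for word in allwords` body (inner loop over the digit constants kept as is)
def clearNumsStep (withoutnums : List String) (word : String) : List String :=
  let word' := "0123456789".toList.foldl (fun w num =>
    if PySem.Str.isIn (String.ofList [num]) w then
      PySem.Str.replace w (String.ofList [num]) ""
    else w) word
  if PySem.Str.len word' > 0 then withoutnums ++ [word'] else withoutnums

def clearNums (allwords : List String) : List String :=
  allwords.foldl clearNumsStep []

-- ===== PORT B =====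
def clearNums_alt (allwords : List String) : List String :=
  let cleaned := allwords.map (fun word =>
    String.ofList (word.toList.filter (fun c => !("0123456789".toList.contains c))))
  cleaned.filter (fun w => !w.toList.isEmpty)

-- ===== PRECONDITION & SPEC =====
def Spec_clearNums (allwords : List String) (out : List String) : Prop := out = clearNums_alt allwords
instance (allwords : List String) (out : List String) : Decidable (Spec_clearNums allwords out) := by unfold Spec_clearNums; infer_instance

-- ===== CLAIM (what is proved, stated in full; the proofs are below) =====
def Claim_equal_clearNums : Prop := ∀ (allwords : List String), Dom_clearNums allwords → Spec_clearNums allwords (clearNums allwords)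

-- ===== LEMMAS AND PROOFS =====

-- B's per-word cleaning function (proof-side abbreviation)
def pvClean (w : String) : String :=
  String.ofList (w.toList.filter (fun c => !("0123456789".toList.contains c)))

theorem pv_alt_eq (ws : List String) :
    clearNums_alt ws = (ws.map pvClean).filter (fun w => !w.toList.isEmpty) := rfl

-- replace.go with a single-char pattern and empty replacement removes every occurrence
theorem pv_go_single (d : Char) (l : List Char) :
    ∀ (fuel : Nat) (acc : List Char), l.length ≤ fuel →
      PySem.Chars.replace.go [d] [] fuel l acc = acc.reverse ++ l.filter (· ≠ d) := by
  induction l with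
  | nil =>
      intro fuel acc _
      cases fuel <;> simp [PySem.Chars.replace.go]
  | cons c t ih =>
      intro fuel acc h
      cases fuel with
      | zero => simp at h
      | succ n =>
        simp only [PySem.Chars.replace.go, List.isPrefixOf]
        by_cases hc : c = d
        · subst hc
          simp only [BEq.rfl, Bool.true_and, if_pos]
          simp only [List.length_singleton, List.drop_succ_cons, List.drop_zero, List.reverse_nil, List.nil_append]
          rw [ih n acc (by simpa using h)]
          simp
        · have hbe : (d == c) = false := by
            simp only [beq_eq_false_iff_ne, ne_eq]
            exact fun h' => hc h'.symm
          simp only [hbe, Bool.false_and, if_neg Bool.false_ne_true]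
          rw [ih n (c :: acc) (by simpa using Nat.le_of_succ_le_succ h)]
          simp [hc]

theorem pv_replace_single (w : String) (d : Char) :
    (PySem.Str.replace w (String.ofList [d]) "").toList = w.toList.filter (· ≠ d) := by
  rw [PySem.Str.toList_replace]
  simp only [PySem.Chars.replace]
  have h1 : (String.ofList [d]).toList = [d] := by simp
  rw [h1]
  simp only [List.isEmpty_cons, if_neg Bool.false_ne_true]
  simpa using pv_go_single d w.toList w.toList.length [] (le_refl _)

-- one step of A's inner loop equals filtering out that digit
theorem pv_step_eq (w : String) (d : Char) :
    (if PySem.Str.isIn (String.ofList [d]) w then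
        PySem.Str.replace w (String.ofList [d]) "" else w)
      = String.ofList (w.toList.filter (· ≠ d)) := by
  apply String.toList_inj.mp
  by_cases h : PySem.Str.isIn (String.ofList [d]) w = true
  · rw [if_pos h, pv_replace_single]
    simp
  · rw [if_neg h]
    have hmem : d ∉ w.toList := by
      intro hm
      apply h
      rw [PySem.Str.isIn_iff_infix]
      simpa using (List.singleton_infix_iff d w.toList).mpr hm
    rw [List.filter_eq_self.mpr ?_]
    · simp
    · intro a ha
      simp only [ne_eq, decide_eq_true_eq]
      exact fun had => hmem (had ▸ ha)

-- A's inner loop over a digit list equals one filter by list membership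
theorem pv_inner_eq (ds : List Char) : ∀ (w : String),
    ds.foldl (fun w num =>
      if PySem.Str.isIn (String.ofList [num]) w then
        PySem.Str.replace w (String.ofList [num]) "" else w) w
    = String.ofList (w.toList.filter (fun c => !(ds.contains c))) := by
  induction ds with
  | nil => intro w; simp
  | cons d ds ih =>
      intro w
      rw [List.foldl_cons, pv_step_eq, ih]
      apply String.toList_inj.mp
      simp only [String.toList_ofList, List.filter_filter]
      apply List.filter_congr
      intro a _
      by_cases had : a = d <;> simp [had]

-- branch condition: Python's len(word) > 0 is "the cleaned word is nonempty"
theorem pv_len_pos_iff (w : String) :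
    (PySem.Str.len w > 0) ↔ (!w.toList.isEmpty) = true := by
  rw [PySem.Str.len_eq]
  rw [Bool.not_eq_true', List.isEmpty_eq_false_iff_exists_mem]
  constructor
  · intro h
    have h' : w.toList.length > 0 := by exact_mod_cast h
    rcases List.exists_mem_of_length_pos h' with ⟨a, ha⟩
    exact ⟨a, ha⟩
  · rintro ⟨a, ha⟩
    have := List.length_pos_of_mem ha
    exact_mod_cast this

-- one outer-loop step of A, in terms of B's per-word cleaner
theorem pv_step_outer (acc : List String) (w : String) :
    clearNumsStep acc w = if (!(pvClean w).toList.isEmpty) = true then acc ++ [pvClean w] else acc := by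
  unfold clearNumsStep
  rw [pv_inner_eq]
  have hc : String.ofList (w.toList.filter (fun c => !("0123456789".toList.contains c))) = pvClean w := rfl
  rw [hc]
  by_cases h : (!(pvClean w).toList.isEmpty) = true
  · rw [if_pos ((pv_len_pos_iff _).mpr h), if_pos h]
  · rw [if_neg (fun hp => h ((pv_len_pos_iff _).mp hp)), if_neg h]

-- outer loop: A's foldl from any accumulator is that accumulator ++ B's value
theorem pv_outer_eq (ws : List String) : ∀ (acc : List String),
    ws.foldl clearNumsStep acc = acc ++ clearNums_alt ws := by
  induction ws with
  | nil => intro acc; rw [pv_alt_eq]; simp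
  | cons w ws ih =>
      intro acc
      rw [List.foldl_cons, pv_step_outer, ih, pv_alt_eq, pv_alt_eq]
      simp only [List.map_cons, List.filter_cons]
      by_cases h : (!(pvClean w).toList.isEmpty) = true
      · rw [if_pos h, if_pos h]
        simp
      · rw [if_neg h, if_neg h]

-- ===== VERDICT (by name: the statement is the Claim_ definition above) =====
theorem clearNums_spec : Claim_equal_clearNums := by
  intro allwords _
  show clearNums allwords = clearNums_alt allwords
  unfold clearNums
  rw [pv_outer_eq allwords [], List.nil_append]
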